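-- pv_equiv track=rewrite | github.com/yapsharlene/CS199-StructuralMotif | code_with_output/parallel_rccmp.py | sample
-- ===== SOURCE A (Python) =====
-- import itertools as it
--
-- def get_range(proteins, r_sample, l):
--     # ranges = []
--     # for i in r_sample:
--     #     ranges.append(range(len(proteins[i])-l+1))
--     # return ranges
--     return list(it.product(*[range(y-l+1) for y in [len(x) for x in [proteins[i] for i in r_sample]]]))
--
-- def sample(proteins, r, l):
--     samples = []
--     for indices in it.combinations(range(len(proteins)),r):
--         for ranges in get_range(proteins, indices, l):
--             sample = []
--             for i in range(len(indices)):
--                 sample.append((indices[i],ranges[i]))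
--             samples.append(sample)
--     return samples
-- ===== SOURCE B (Python) =====
-- def sample(proteins, r, l):
--     n = len(proteins)
--
--     def positions(idxs):
--         # all (index, position) assignments for the chosen indices, last position fastest
--         if not idxs:
--             return [[]]
--         i = idxs[0]
--         rest = positions(idxs[1:])
--         return [[(i, p)] + tail
--                 for p in range(len(proteins[i]) - l + 1)
--                 for tail in rest]
--
--     def choose(start, k):
--         # index combinations from [start, n) in lexicographic order
--         if k == 0:
--             return [[]]
--         if k < 0 or k > n - start:
--             return []
--         with_start = [[start] + tail for tail in choose(start + 1, k - 1)]
--         return with_start + choose(start + 1, k)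
--
--     return [s for idxs in choose(0, r) for s in positions(idxs)]
-- ===== Notes on version B (the rewrite author's own statement) =====
-- stated objective: alternative
-- what changed: Replaces itertools.combinations plus the product-of-ranges helper and the index-zipping loop with two direct recursions: choose picks index combinations by include/skip recursion on the start index, and positions builds the (index, position) pairs directly while recursing over the chosen indices (rightmost fastest), so no tuple zipping pass is needed.
import Mathlib
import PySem

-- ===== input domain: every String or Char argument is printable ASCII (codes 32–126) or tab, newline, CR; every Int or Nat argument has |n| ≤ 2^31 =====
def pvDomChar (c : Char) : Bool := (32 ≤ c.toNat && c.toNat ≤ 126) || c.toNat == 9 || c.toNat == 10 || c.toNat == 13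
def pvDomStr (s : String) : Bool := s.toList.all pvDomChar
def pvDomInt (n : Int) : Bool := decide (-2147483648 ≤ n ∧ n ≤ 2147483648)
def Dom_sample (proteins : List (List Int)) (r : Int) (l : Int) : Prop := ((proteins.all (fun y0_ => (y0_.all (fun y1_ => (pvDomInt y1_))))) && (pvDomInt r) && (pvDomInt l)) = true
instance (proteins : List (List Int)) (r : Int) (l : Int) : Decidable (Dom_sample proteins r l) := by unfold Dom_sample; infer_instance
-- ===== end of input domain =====

-- B replaces itertools.combinations/product and the index-zipping loop with two direct
-- recursions (include/skip index choice, then direct pair construction); objective: alternative.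

-- ===== PORT A =====

-- itertools.product(*xss), exact odometer order (leftmost slowest)
def pyProduct (xss : List (List Int)) : List (List Int) :=
  match xss with
  | [] => [[]]
  | xs :: rest => xs.flatMap (fun x => (pyProduct rest).map (fun t => x :: t))

-- itertools.combinations(pool, r), lexicographic order over the pool's order
def pyCombinations (pool : List Int) (r : Nat) : List (List Int) :=
  match r, pool with
  | 0, _ => [[]]
  | _ + 1, [] => []
  | rr + 1, x :: rest =>
      (pyCombinations rest rr).map (fun t => x :: t) ++ pyCombinations rest (rr + 1)

def getRange (proteins : List (List Int)) (r_sample : List Int) (l : Int) : List (List Int) :=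
  pyProduct
    (((r_sample.map (fun i => (PySem.List.pyGet? proteins i).getD [])).map
        (fun x => (x.length : Int))).map
      (fun y => PySem.List.pyRange 0 (y - l + 1) 1))

def sample (proteins : List (List Int)) (r : Int) (l : Int) : List (List (Int × Int)) :=
  (pyCombinations (PySem.List.pyRange 0 (proteins.length : Int) 1) r.toNat).foldl
    (fun samples indices =>
      (getRange proteins indices l).foldl
        (fun samples ranges =>
          samples ++
            [(PySem.List.pyRange 0 (indices.length : Int) 1).foldl
              (fun s i => s ++ [(PySem.List.pyGetD indices i 0, PySem.List.pyGetD ranges i 0)])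
              []])
        samples)
    []

-- ===== PORT B =====

-- all (index, position) assignments for the chosen indices, last position fastest
def posB (proteins : List (List Int)) (l : Int) (idxs : List Int) : List (List (Int × Int)) :=
  match idxs with
  | [] => [[]]
  | i :: rest =>
      let prest := posB proteins l rest
      (PySem.List.pyRange 0 ((((PySem.List.pyGet? proteins i).getD []).length : Int) - l + 1) 1).flatMap
        (fun p => prest.map (fun tail => (i, p) :: tail))

-- index combinations from [start, n) in lexicographic order; fuel only makes the
-- start-index recursion structural (never exhausted when fuel ≥ (n - start).toNat)
def chooseB (n : Int) (fuel : Nat) (start : Int) (k : Int) : List (List Int) :=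
  if k = 0 then [[]]
  else if k < 0 ∨ n - start < k then []
  else
    match fuel with
    | 0 => []
    | fuel + 1 =>
        (chooseB n fuel (start + 1) (k - 1)).map (fun t => start :: t) ++
          chooseB n fuel (start + 1) k

def sample_alt (proteins : List (List Int)) (r : Int) (l : Int) : List (List (Int × Int)) :=
  (chooseB (proteins.length : Int) proteins.length 0 r).flatMap (fun idxs => posB proteins l idxs)

-- ===== PRECONDITION & SPEC =====
-- Pre_ excludes r < 0, on which Python's itertools.combinations raises ValueError.
def Pre_sample (_proteins : List (List Int)) (r : Int) (_l : Int) : Prop := 0 ≤ r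
instance (proteins : List (List Int)) (r : Int) (l : Int) : Decidable (Pre_sample proteins r l) := by unfold Pre_sample; infer_instance

def pvWitness_sample : List (List Int) × Int × Int := ([[1, 2], [3]], 1, 1)

def Spec_sample (proteins : List (List Int)) (r : Int) (l : Int) (out : List (List (Int × Int))) : Prop := out = sample_alt proteins r l
instance (proteins : List (List Int)) (r : Int) (l : Int) (out : List (List (Int × Int))) : Decidable (Spec_sample proteins r l out) := by unfold Spec_sample; infer_instance

-- ===== CLAIM (what is proved, stated in full; the proofs are below) =====
def Claim_equal_sample : Prop := ∀ (proteins : List (List Int)) (r : Int) (l : Int), Dom_sample proteins r l → Pre_sample proteins r l → Spec_sample proteins r l (sample proteins r l)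

-- ===== LEMMAS AND PROOFS =====

theorem pyComb_zero (pool : List Int) : pyCombinations pool 0 = [[]] := by
  cases pool <;> rfl

theorem pyComb_nil (rr : Nat) : pyCombinations [] (rr + 1) = [] := rfl

theorem pyComb_cons (x : Int) (rest : List Int) (rr : Nat) :
    pyCombinations (x :: rest) (rr + 1)
      = (pyCombinations rest rr).map (fun t => x :: t) ++ pyCombinations rest (rr + 1) := rfl

theorem pyComb_short (pool : List Int) (rr : Nat) (h : pool.length < rr) :
    pyCombinations pool rr = [] := by
  induction pool generalizing rr with
  | nil =>
    obtain ⟨m, rfl⟩ : ∃ m, rr = m + 1 := ⟨rr - 1, by omega⟩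
    exact pyComb_nil m
  | cons x rest ih =>
    obtain ⟨m, rfl⟩ : ∃ m, rr = m + 1 := ⟨rr - 1, by omega⟩
    rw [pyComb_cons, ih m (by simpa using h), ih (m + 1) (by simp at h ⊢; omega)]
    simp

-- every tuple produced by product has one component per factor
theorem length_mem_pyProduct (xss : List (List Int)) (t : List Int) (h : t ∈ pyProduct xss) :
    t.length = xss.length := by
  induction xss generalizing t with
  | nil => simp [pyProduct] at h; simp [h]
  | cons xs rest ih =>
    simp only [pyProduct, List.mem_flatMap, List.mem_map] at h
    obtain ⟨x, _, t', ht', rfl⟩ := h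
    simp [ih t' ht']

-- A's index-zipping loop is List.zip when the lengths agree
theorem zipFold_eq_zip (idxs ranges : List Int) (h : ranges.length = idxs.length) :
    (PySem.List.pyRange 0 (idxs.length : Int) 1).foldl
      (fun s i => s ++ [(PySem.List.pyGetD idxs i 0, PySem.List.pyGetD ranges i 0)]) []
      = idxs.zip ranges := by
  rw [PySem.List.foldl_append_singleton_eq_map]
  simp only [List.nil_append]
  apply List.ext_getElem
  · simp [PySem.List.length_pyRange_one, h]
  · intro k h1 h2
    have hk : k < idxs.length := by
      simpa [PySem.List.length_pyRange_one] using h1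
    simp only [List.getElem_map, PySem.List.getElem_pyRange_one, List.getElem_zip]
    rw [show (0 : Int) + k = (k : Int) by ring]
    rw [PySem.List.pyGetD_natCast, PySem.List.pyGetD_natCast]
    simp [List.getD_eq_getElem?_getD, hk, h ▸ hk]

-- B's positions recursion equals product-of-ranges mapped through zip
theorem posB_eq (proteins : List (List Int)) (l : Int) (idxs : List Int) :
    posB proteins l idxs
      = (getRange proteins idxs l).map (fun ranges => idxs.zip ranges) := by
  induction idxs with
  | nil => simp [posB, getRange, pyProduct]
  | cons i rest ih =>
    simp only [posB, getRange, List.map_map, List.map_cons] at *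
    simp only [pyProduct, List.map_flatMap, List.map_map]
    rw [ih]
    simp [Function.comp_def, List.map_map, List.zip_cons_cons]

-- B's choose recursion equals A's combinations of range(start, n)
theorem chooseB_eq (n : Int) (fuel : Nat) (start k : Int) (hk : 0 ≤ k)
    (hf : (n - start).toNat ≤ fuel) :
    chooseB n fuel start k
      = pyCombinations (PySem.List.pyRange start n 1) k.toNat := by
  induction fuel generalizing start k with
  | zero =>
    rw [chooseB]
    by_cases h0 : k = 0
    · subst h0; simp [pyComb_zero]
    · have hsh : (PySem.List.pyRange start n 1).length < k.toNat := by
        rw [PySem.List.length_pyRange_one]; omega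
      rw [pyComb_short _ _ hsh, if_neg h0, if_pos (by omega)]
  | succ fuel ih =>
    rw [chooseB]
    by_cases h0 : k = 0
    · subst h0; simp [pyComb_zero]
    · by_cases hsh : n - start < k
      · have : (PySem.List.pyRange start n 1).length < k.toNat := by
          rw [PySem.List.length_pyRange_one]; omega
        rw [pyComb_short _ _ this, if_neg h0, if_pos (by omega)]
      · have hkt : k.toNat = (k - 1).toNat + 1 := by omega
        rw [PySem.List.pyRange_one_cons (by omega), hkt, pyComb_cons]
        rw [if_neg h0, if_neg (by omega)]
        rw [ih (start + 1) (k - 1) (by omega) (by omega),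
            ih (start + 1) k hk (by omega), hkt]

-- both sides as a flatMap over the same combination list
theorem sample_flat (proteins : List (List Int)) (r : Int) (l : Int) :
    sample proteins r l
      = (pyCombinations (PySem.List.pyRange 0 (proteins.length : Int) 1) r.toNat).flatMap
          (fun indices =>
            (getRange proteins indices l).map
              (fun ranges =>
                (PySem.List.pyRange 0 (indices.length : Int) 1).foldl
                  (fun s i => s ++ [(PySem.List.pyGetD indices i 0, PySem.List.pyGetD ranges i 0)])
                  [])) := by
  unfold sample
  rw [PySem.List.foldl_congr_mem (g := fun samples indices =>
        samples ++ (getRange proteins indices l).map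
          (fun ranges =>
            (PySem.List.pyRange 0 (indices.length : Int) 1).foldl
              (fun s i => s ++ [(PySem.List.pyGetD indices i 0, PySem.List.pyGetD ranges i 0)])
              []))]
  · rw [PySem.List.foldl_append_eq_flatMap]
    simp
  · intro acc indices _
    rw [PySem.List.foldl_append_singleton_eq_map]

-- ranges produced by getRange have one entry per chosen index
theorem length_mem_getRange (proteins : List (List Int)) (idxs : List Int) (l : Int)
    (ranges : List Int) (h : ranges ∈ getRange proteins idxs l) :
    ranges.length = idxs.length := by
  have := length_mem_pyProduct _ _ h
  simpa [getRange] using this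

-- ===== VERDICT (by name: the statement is the Claim_ definition above) =====
theorem sample_spec : Claim_equal_sample := by
  intro proteins r l _ hpre
  unfold Spec_sample sample_alt
  rw [sample_flat, chooseB_eq _ _ _ _ hpre (by omega)]
  apply List.flatMap_congr
  intro idxs _
  rw [posB_eq]
  apply List.map_congr_left
  intro ranges hr
  exact zipFold_eq_zip idxs ranges (length_mem_getRange proteins idxs l ranges hr)
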